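-- pv_equiv track=rewrite | github.com/taroyabuki/classic-basic | src/fm11basic.py | _merge_output_window
-- ===== SOURCE A (Python) =====
-- def _merge_output_window(previous_lines: list[str], current_lines: list[str]) -> tuple[list[str], int]:
--     if not previous_lines:
--         return current_lines, 0
--     max_overlap = min(len(previous_lines), len(current_lines))
--     for overlap in range(max_overlap, -1, -1):
--         previous_suffix = previous_lines[-overlap:] if overlap else []
--         for start in range(0, len(current_lines) - overlap + 1):
--             if overlap and previous_suffix != current_lines[start : start + overlap]:
--                 continue
--             return current_lines[start + overlap :], overlap
--     return current_lines, 0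
-- ===== SOURCE B (Python) =====
-- def _merge_output_window(previous_lines: list[str], current_lines: list[str]) -> tuple[list[str], int]:
--     if not previous_lines:
--         return current_lines, 0
--     n, m = len(previous_lines), len(current_lines)
--     best_len, best_end = 0, 0
--     for e in range(1, m + 1):
--         # longest common suffix of previous_lines and current_lines[:e]
--         k = 0
--         while k < n and k < e and previous_lines[n - 1 - k] == current_lines[e - 1 - k]:
--             k += 1
--         if k > best_len:
--             best_len, best_end = k, e
--     return current_lines[best_end:], best_len
-- ===== Notes on version B (the rewrite author's own statement) =====
-- stated objective: faster
-- what changed: Replaced A's triple loop (overlap descending x start position x slice comparison) by a single pass over end positions that computes the longest common suffix of previous_lines and each prefix current_lines[:e], keeping the first position attaining the maximum.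
import Mathlib
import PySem

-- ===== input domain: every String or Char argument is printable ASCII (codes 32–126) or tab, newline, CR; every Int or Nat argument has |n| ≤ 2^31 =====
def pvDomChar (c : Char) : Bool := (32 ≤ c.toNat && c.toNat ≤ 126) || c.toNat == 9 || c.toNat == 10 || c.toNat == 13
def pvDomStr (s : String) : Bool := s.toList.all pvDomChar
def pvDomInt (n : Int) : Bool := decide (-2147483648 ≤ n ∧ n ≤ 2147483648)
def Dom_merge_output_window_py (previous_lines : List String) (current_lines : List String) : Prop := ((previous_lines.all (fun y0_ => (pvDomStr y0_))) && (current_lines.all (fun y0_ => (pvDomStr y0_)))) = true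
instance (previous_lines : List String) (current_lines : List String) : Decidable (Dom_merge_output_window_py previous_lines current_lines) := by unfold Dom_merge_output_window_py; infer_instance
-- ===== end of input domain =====

-- B replaces A's triple loop (overlap descending × start × slice compare) by a single pass over
-- end positions computing the longest common suffix of previous_lines and current_lines[:e];
-- objective: alternative/faster (asymptotically fewer comparisons in the worst case).

-- ===== PORT A =====
-- inner loop: 'for start in range(0, len(current_lines) - overlap + 1)' with early return;
-- cnt is the number of remaining iterations, s the current value of start
def pvAInner (previous_suffix current_lines : List String) (overlap : Nat) (s cnt : Nat) :
    Option (List String × Int) :=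
  match cnt with
  | 0 => none
  | cnt' + 1 =>
    if overlap ≠ 0 ∧ previous_suffix ≠ PySem.List.slice current_lines (some (s : Int)) (some ((s : Int) + (overlap : Int))) then
      pvAInner previous_suffix current_lines overlap (s + 1) cnt'
    else
      some (PySem.List.slice current_lines (some ((s : Int) + (overlap : Int))) none, (overlap : Int))

-- outer loop: 'for overlap in range(max_overlap, -1, -1)', descending
def pvAOuter (previous_lines current_lines : List String) (overlap : Nat) : List String × Int :=
  let previous_suffix := if overlap ≠ 0 then PySem.List.slice previous_lines (some (-(overlap : Int))) none else []
  match pvAInner previous_suffix current_lines overlap 0 (current_lines.length - overlap + 1) with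
  | some r => r
  | none =>
    match overlap with
    | 0 => (current_lines, 0)          -- loop exhausted: final 'return current_lines, 0'
    | ov + 1 => pvAOuter previous_lines current_lines ov

def merge_output_window_py (previous_lines : List String) (current_lines : List String) : List String × Int :=
  if previous_lines = [] then (current_lines, 0)
  else pvAOuter previous_lines current_lines (min previous_lines.length current_lines.length)

-- ===== PORT B =====
-- the 'while k < n and k < e and previous_lines[n-1-k] == current_lines[e-1-k]' loop
-- (indices are in range whenever read, by the guard, so List.getD is exact here)
def pvLcs (previous_lines current_lines : List String) (n e k : Nat) : Nat :=
  if h : k < n ∧ k < e ∧ previous_lines.getD (n - 1 - k) "" = current_lines.getD (e - 1 - k) "" then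
    pvLcs previous_lines current_lines n e (k + 1)
  else k
termination_by n - k
decreasing_by omega

-- the 'for e in range(1, m + 1)' loop carrying (best_len, best_end)
def pvBGo (previous_lines current_lines : List String) (n m e best_len best_end : Nat) : Nat × Nat :=
  if h : e ≤ m then
    let k := pvLcs previous_lines current_lines n e 0
    if best_len < k then pvBGo previous_lines current_lines n m (e + 1) k e
    else pvBGo previous_lines current_lines n m (e + 1) best_len best_end
  else (best_len, best_end)
termination_by m + 1 - e
decreasing_by all_goals omega

def merge_output_window_py_alt (previous_lines : List String) (current_lines : List String) : List String × Int :=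
  if previous_lines = [] then (current_lines, 0)
  else
    let n := previous_lines.length
    let m := current_lines.length
    let r := pvBGo previous_lines current_lines n m 1 0 0
    (PySem.List.slice current_lines (some ((r.2 : Int))) none, (r.1 : Int))

-- ===== PRECONDITION & SPEC =====
def Spec_merge_output_window_py (previous_lines : List String) (current_lines : List String) (out : List String × Int) : Prop := out = merge_output_window_py_alt previous_lines current_lines
instance (previous_lines : List String) (current_lines : List String) (out : List String × Int) : Decidable (Spec_merge_output_window_py previous_lines current_lines out) := by unfold Spec_merge_output_window_py; infer_instance

-- ===== CLAIM (what is proved, stated in full; the proofs are below) =====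
def Claim_equal_merge_output_window_py : Prop := ∀ (previous_lines : List String) (current_lines : List String), Dom_merge_output_window_py previous_lines current_lines → Spec_merge_output_window_py previous_lines current_lines (merge_output_window_py previous_lines current_lines)

-- ===== LEMMAS AND PROOFS =====

-- element-wise match of the j-th-from-the-end line of previous_lines against current_lines[:e]
def pvMatch (p c : List String) (n e j : Nat) : Prop :=
  p.getD (n - 1 - j) "" = c.getD (e - 1 - j) ""

def pvGood (p c : List String) (n e k : Nat) : Prop :=
  k ≤ n ∧ k ≤ e ∧ ∀ j < k, pvMatch p c n e j

-- suffix-of-previous equals the block of current starting at s, of length L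
def pvEqS (p c : List String) (L s : Nat) : Prop :=
  p.drop (p.length - L) = (c.drop s).take L

def pvK (p c : List String) (e : Nat) : Nat := pvLcs p c p.length e 0

-- the characterizing predicate both ports' results satisfy (when previous_lines ≠ [])
def pvPhi (p c : List String) (out : List String × Int) : Prop :=
  ∃ L s : Nat, out = (c.drop (s + L), (L : Int)) ∧ L ≤ min p.length c.length ∧
    s + L ≤ c.length ∧ pvEqS p c L s ∧
    (∀ L' s' : Nat, L < L' → L' ≤ min p.length c.length → s' + L' ≤ c.length → ¬ pvEqS p c L' s') ∧
    (∀ s' : Nat, s' < s → s' + L ≤ c.length → ¬ pvEqS p c L s')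

lemma pvLcs_ge (p c : List String) (n e k : Nat) : k ≤ pvLcs p c n e k := by
  fun_induction pvLcs <;> omega

lemma pvLcs_good (p c : List String) (n e k : Nat) (h : pvGood p c n e k) :
    pvGood p c n e (pvLcs p c n e k) := by
  fun_induction pvLcs with
  | case1 k h' ih =>
    apply ih
    refine ⟨h'.1, h'.2.1, fun j hj => ?_⟩
    rcases Nat.lt_or_ge j k with hk | hk
    · exact h.2.2 j hk
    · have : j = k := by omega
      subst this; exact h'.2.2
  | case2 k h' => exact h

lemma pvLcs_max_aux (p c : List String) (n e L : Nat) (hL : pvGood p c n e L) :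
    ∀ gas k, L - k ≤ gas → k ≤ L → L ≤ pvLcs p c n e k := by
  obtain ⟨hLn, hLe, hLm⟩ := hL
  intro gas
  induction gas with
  | zero =>
    intro k h1 h2
    have hk : k = L := by omega
    subst hk
    exact pvLcs_ge p c n e k
  | succ gas ih =>
    intro k h1 h2
    rcases Nat.eq_or_lt_of_le h2 with heq | hlt
    · subst heq; exact pvLcs_ge p c n e k
    · rw [pvLcs, dif_pos ⟨by omega, by omega, hLm k hlt⟩]
      exact ih (k + 1) (by omega) (by omega)

lemma pvLcs_max (p c : List String) (n e k L : Nat) (hk : k ≤ L) (hL : pvGood p c n e L) :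
    L ≤ pvLcs p c n e k :=
  pvLcs_max_aux p c n e L hL (L - k) k (le_refl _) hk

lemma pvK_good (p c : List String) (e : Nat) : pvGood p c p.length e (pvK p c e) :=
  pvLcs_good p c p.length e 0 ⟨Nat.zero_le _, Nat.zero_le _, fun j hj => by omega⟩

lemma pvK_max (p c : List String) (e L : Nat) (hL : pvGood p c p.length e L) : L ≤ pvK p c e :=
  pvLcs_max p c p.length e 0 L (Nat.zero_le _) hL

lemma pvEqS_iff_match (p c : List String) (L s : Nat) (h1 : 1 ≤ L) (hLn : L ≤ p.length)
    (hsm : s + L ≤ c.length) :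
    pvEqS p c L s ↔ ∀ j < L, pvMatch p c p.length (s + L) j := by
  unfold pvEqS pvMatch
  constructor
  · intro heq j hj
    have h2 : (p.drop (p.length - L))[L - 1 - j]? = ((c.drop s).take L)[L - 1 - j]? := by
      rw [heq]
    rw [List.getElem?_drop] at h2
    rw [List.getElem?_take, if_pos (show L - 1 - j < L by omega)] at h2
    rw [List.getElem?_drop] at h2
    have e1 : p.length - L + (L - 1 - j) = p.length - 1 - j := by omega
    have e2 : s + (L - 1 - j) = s + L - 1 - j := by omega
    rw [e1, e2] at h2
    rw [List.getD_eq_getElem?_getD, List.getD_eq_getElem?_getD, h2]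
  · intro hm
    apply List.ext_getElem?
    intro i
    rcases Nat.lt_or_ge i L with hi | hi
    · rw [List.getElem?_drop, List.getElem?_take, if_pos hi, List.getElem?_drop]
      have hj := hm (L - 1 - i) (by omega)
      rw [List.getD_eq_getElem?_getD, List.getD_eq_getElem?_getD] at hj
      have e1 : p.length - 1 - (L - 1 - i) = p.length - L + i := by omega
      have e2 : s + L - 1 - (L - 1 - i) = s + i := by omega
      rw [e1, e2] at hj
      have hp : p.length - L + i < p.length := by omega
      have hc : s + i < c.length := by omega
      rw [List.getElem?_eq_getElem hp, List.getElem?_eq_getElem hc] at hj ⊢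
      simp only [Option.getD_some] at hj
      simp [hj]
    · rw [List.getElem?_eq_none, List.getElem?_eq_none]
      · simp; omega
      · simp; omega

lemma pvEqS_iff_K (p c : List String) (L s : Nat) (h1 : 1 ≤ L) (hLn : L ≤ p.length)
    (hsm : s + L ≤ c.length) :
    pvEqS p c L s ↔ L ≤ pvK p c (s + L) := by
  rw [pvEqS_iff_match p c L s h1 hLn hsm]
  constructor
  · intro hm
    exact pvK_max p c (s + L) L ⟨hLn, by omega, hm⟩
  · intro hK j hj
    exact (pvK_good p c (s + L)).2.2 j (by omega)

lemma pvPhi_unique (p c : List String) (o1 o2 : List String × Int)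
    (h1 : pvPhi p c o1) (h2 : pvPhi p c o2) : o1 = o2 := by
  obtain ⟨L1, s1, ho1, hL1, hs1, he1, hmax1, hmin1⟩ := h1
  obtain ⟨L2, s2, ho2, hL2, hs2, he2, hmax2, hmin2⟩ := h2
  have hLL : L1 = L2 := by
    rcases Nat.lt_trichotomy L1 L2 with h | h | h
    · exact absurd he2 (hmax1 L2 s2 h hL2 hs2)
    · exact h
    · exact absurd he1 (hmax2 L1 s1 h hL1 hs1)
  subst hLL
  have hss : s1 = s2 := by
    rcases Nat.lt_trichotomy s1 s2 with h | h | h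
    · exact absurd he1 (hmin2 s1 h hs1)
    · exact h
    · exact absurd he2 (hmin1 s2 h hs2)
  subst hss
  rw [ho1, ho2]

lemma pvSlice_nat (c : List String) (s L : Nat) :
    PySem.List.slice c (some (s : Int)) (some ((s : Int) + (L : Int))) = (c.drop s).take L :=
  PySem.List.slice_natCast_add c s L

-- first-match characterization of the inner loop (in drop/take form)
lemma pvAInner_spec (suf c : List String) (L s cnt : Nat) :
    (pvAInner suf c L s cnt = none ∧ ∀ i < cnt, L ≠ 0 ∧ suf ≠ (c.drop (s + i)).take L) ∨
    (∃ i < cnt, (∀ j < i, L ≠ 0 ∧ suf ≠ (c.drop (s + j)).take L) ∧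
      ¬(L ≠ 0 ∧ suf ≠ (c.drop (s + i)).take L) ∧
      pvAInner suf c L s cnt = some (c.drop (s + i + L), (L : Int))) := by
  induction cnt generalizing s with
  | zero => left; exact ⟨rfl, fun i hi => by omega⟩
  | succ cnt ih =>
    rw [pvAInner]
    rw [pvSlice_nat c s L]
    by_cases hc : L ≠ 0 ∧ suf ≠ (c.drop s).take L
    · rw [if_pos hc]
      rcases ih (s + 1) with ⟨hn, hall⟩ | ⟨i, hi, hpre, hok, heq⟩
      · left
        refine ⟨hn, fun i hi => ?_⟩
        rcases Nat.eq_zero_or_pos i with h0 | h0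
        · subst h0; simpa using hc
        · have := hall (i - 1) (by omega)
          have e : s + 1 + (i - 1) = s + i := by omega
          rwa [e] at this
      · right
        refine ⟨i + 1, by omega, fun j hj => ?_, ?_, ?_⟩
        · rcases Nat.eq_zero_or_pos j with h0 | h0
          · subst h0; simpa using hc
          · have := hpre (j - 1) (by omega)
            have e : s + 1 + (j - 1) = s + j := by omega
            rwa [e] at this
        · have e : s + 1 + i = s + (i + 1) := by omega
          rwa [e] at hok
        · have e : s + 1 + i = s + (i + 1) := by omega
          rwa [e] at heq
    · rw [if_neg hc]
      right
      refine ⟨0, by omega, fun j hj => by omega, by simpa using hc, ?_⟩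
      have e2 : s + 0 + L = s + L := by omega
      rw [e2]
      have e3 : (s : Int) + (L : Int) = ((s + L : Nat) : Int) := by push_cast; ring
      rw [e3, PySem.List.slice_from_natCast]

lemma pvAOuter_phi (p c : List String) (hp : p ≠ []) :
    ∀ ov, ov ≤ min p.length c.length →
      (∀ L' s' : Nat, ov < L' → L' ≤ min p.length c.length → s' + L' ≤ c.length →
        ¬ pvEqS p c L' s') →
      pvPhi p c (pvAOuter p c ov) := by
  intro ov
  induction ov with
  | zero =>
    intro _ hmax
    rw [pvAOuter]
    simp only [ne_eq, not_true_eq_false, if_neg, reduceIte]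
    rcases pvAInner_spec [] c 0 0 (c.length - 0 + 1) with ⟨_, hall⟩ | ⟨i, hi, hpre, hok, heq⟩
    · exact absurd (hall 0 (by omega)).1 (by simp)
    · have hi0 : i = 0 := by
        by_contra h0
        exact (hpre 0 (by omega)).1 rfl
      subst hi0
      simp only [Nat.zero_add] at heq
      rw [heq]
      refine ⟨0, 0, ?_, by omega, by omega, ?_, hmax, fun s' hs' _ => by omega⟩
      · simp
      · unfold pvEqS; simp
  | succ ov ih =>
    intro hov hmax
    rw [pvAOuter]
    simp only [Nat.succ_ne_zero, ne_eq, not_false_eq_true, if_pos, reduceIte]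
    have hsuf : PySem.List.slice p (some (-((ov + 1 : Nat) : Int))) none
        = p.drop (p.length - (ov + 1)) :=
      PySem.List.slice_from_neg_natCast p (ov + 1) (by omega)
    rcases pvAInner_spec (PySem.List.slice p (some (-((ov + 1 : Nat) : Int))) none) c (ov + 1) 0
        (c.length - (ov + 1) + 1) with ⟨hn, hall⟩ | ⟨i, hi, hpre, hok, heq⟩
    · rw [hn]
      apply ih (by omega)
      intro L' s' hlt hle hsm
      rcases Nat.lt_or_ge (ov + 1) L' with h | h
      · exact hmax L' s' h hle hsm
      · have hL' : L' = ov + 1 := by omega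
        subst hL'
        have hfail := hall s' (by omega)
        rw [hsuf] at hfail
        simp only [Nat.zero_add] at hfail
        intro he
        unfold pvEqS at he
        exact hfail.2 he
    · rw [heq]
      simp only [Nat.zero_add] at hpre hok heq ⊢
      push_neg at hok
      have hEq : pvEqS p c (ov + 1) i := by
        unfold pvEqS
        rw [← hsuf]
        exact hok (by omega)
      refine ⟨ov + 1, i, rfl, hov, by omega, hEq, hmax, ?_⟩
      intro s' hs' _
      have := hpre s' hs'
      rw [hsuf] at this
      exact this.2
  -- i + (ov+1) ≤ c.length: from hi : i < c.length - (ov+1) + 1 and ov+1 ≤ c.length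

lemma pvBGo_spec (p c : List String) (m e0 b be : Nat) (hm : m = c.length)
    (he1 : 1 ≤ e0) (he2 : e0 ≤ m + 1)
    (hle : ∀ e, 1 ≤ e → e < e0 → pvK p c e ≤ b)
    (hwit : (b = 0 ∧ be = 0) ∨
      (1 ≤ b ∧ 1 ≤ be ∧ be < e0 ∧ pvK p c be = b ∧ ∀ e, 1 ≤ e → e < be → pvK p c e < b)) :
    (∀ e, 1 ≤ e → e ≤ m → pvK p c e ≤ (pvBGo p c p.length m e0 b be).1) ∧
    ((pvBGo p c p.length m e0 b be).1 = 0 ∧ (pvBGo p c p.length m e0 b be).2 = 0 ∨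
      (1 ≤ (pvBGo p c p.length m e0 b be).1 ∧
        1 ≤ (pvBGo p c p.length m e0 b be).2 ∧ (pvBGo p c p.length m e0 b be).2 ≤ m ∧
        pvK p c (pvBGo p c p.length m e0 b be).2 = (pvBGo p c p.length m e0 b be).1 ∧
        ∀ e, 1 ≤ e → e < (pvBGo p c p.length m e0 b be).2 →
          pvK p c e < (pvBGo p c p.length m e0 b be).1)) := by
  fun_induction pvBGo with
  | case1 e0 b be h k hbk ih =>
    -- b < k = pvK p c e0, take new witness (k, e0)
    apply ih (by omega) (by omega)
    · intro e h1 h2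
      rcases Nat.lt_or_ge e e0 with hlt | hge
      · have := hle e h1 hlt; omega
      · have : e = e0 := by omega
        subst this; exact le_refl _
    · right
      have hkk : pvK p c e0 = k := rfl
      refine ⟨by omega, by omega, by omega, rfl, ?_⟩
      intro e h1 h2
      have := hle e h1 h2; omega
  | case2 e0 b be h k hbk ih =>
    apply ih (by omega) (by omega)
    · intro e h1 h2
      rcases Nat.lt_or_ge e e0 with hlt | hge
      · exact hle e h1 hlt
      · have : e = e0 := by omega
        subst this
        have hkk : pvK p c e = k := rfl
        omega
    · rcases hwit with ⟨hb, hbe⟩ | ⟨h0, h1, h2, h3, h4⟩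
      · left; exact ⟨hb, hbe⟩
      · right; exact ⟨h0, h1, by omega, h3, h4⟩
  | case3 e0 b be h =>
    constructor
    · intro e h1 h2
      exact hle e h1 (by omega)
    · rcases hwit with ⟨hb, hbe⟩ | ⟨h0, h1, h2, h3, h4⟩
      · left; exact ⟨hb, hbe⟩
      · right; exact ⟨h0, h1, by omega, h3, h4⟩

lemma pvK_le (p c : List String) (e : Nat) : pvK p c e ≤ p.length ∧ pvK p c e ≤ e :=
  ⟨(pvK_good p c e).1, (pvK_good p c e).2.1⟩

lemma pvBGo_phi (p c : List String) (hp : p ≠ []) :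
    pvPhi p c (c.drop (pvBGo p c p.length c.length 1 0 0).2,
      ((pvBGo p c p.length c.length 1 0 0).1 : Int)) := by
  obtain ⟨hmax, hwit⟩ := pvBGo_spec p c c.length 1 0 0 rfl (by omega) (by omega)
    (fun e h1 h2 => by omega) (Or.inl ⟨rfl, rfl⟩)
  set B := (pvBGo p c p.length c.length 1 0 0).1 with hB
  set BE := (pvBGo p c p.length c.length 1 0 0).2 with hBE
  rcases hwit with ⟨hb0, hbe0⟩ | ⟨hB1, h1, h2, h3, h4⟩
  · -- no nonempty match anywhere
    rw [hb0, hbe0]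
    refine ⟨0, 0, by simp, by omega, by omega, ?_, ?_, fun s' hs' _ => by omega⟩
    · unfold pvEqS; simp
    · intro L' s' hlt hle hsm he
      have hK := (pvEqS_iff_K p c L' s' (by omega) (by omega) hsm).mp he
      have := hmax (s' + L') (by omega) hsm
      omega
  · -- witness (B, BE), B = pvK BE ≥ 1
    have hBn : B ≤ p.length := by rw [← h3]; exact (pvK_le p c BE).1
    have hBe : B ≤ BE := by rw [← h3]; exact (pvK_le p c BE).2
    refine ⟨B, BE - B, ?_, by omega, by omega, ?_, ?_, ?_⟩
    · have e : BE - B + B = BE := by omega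
      rw [e]
    · rw [pvEqS_iff_K p c B (BE - B) hB1 hBn (by omega)]
      have e : BE - B + B = BE := by omega
      rw [e, h3]
    · intro L' s' hlt hle hsm he
      have hK := (pvEqS_iff_K p c L' s' (by omega) (by omega) hsm).mp he
      have := hmax (s' + L') (by omega) hsm
      omega
    · intro s' hs' hsm he
      have hK := (pvEqS_iff_K p c B s' hB1 hBn hsm).mp he
      have := h4 (s' + B) (by omega) (by omega)
      omega

-- ===== VERDICT (by name: the statement is the Claim_ definition above) =====
theorem merge_output_window_py_spec : Claim_equal_merge_output_window_py := by
  intro p c _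
  unfold Spec_merge_output_window_py
  by_cases hp : p = []
  · simp [merge_output_window_py, merge_output_window_py_alt, hp]
  · rw [merge_output_window_py, merge_output_window_py_alt, if_neg hp, if_neg hp]
    have hA := pvAOuter_phi p c hp (min p.length c.length) (le_refl _)
      (fun L' s' hlt hle _ => by omega)
    have hB := pvBGo_phi p c hp
    have e : PySem.List.slice c (some (((pvBGo p c p.length c.length 1 0 0).2 : Nat) : Int)) none
        = c.drop (pvBGo p c p.length c.length 1 0 0).2 :=
      PySem.List.slice_from_natCast c _
    simp only [e]
    exact pvPhi_unique p c _ _ hA hB
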